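-- pv_equiv track=rewrite | github.com/v-t-9/PythonDataTypes-w3r | List/ex40.py | split_first_char
-- ===== SOURCE A (Python) =====
-- def split_first_char(li):
--     a = ["a"]
--     b = ["b"]
--     c = ["c"]
--     d = ["d"]
--     e = ["e"]
--     f = ["f"]
--     g = ["g"]
--     h = ["h"]
--     i = ["i"]
--     j = ["j"]
--     k = ["k"]
--     l = ["l"]
--     m = ["m"]
--     n = ["n"]
--     o = ["o"]
--     p = ["p"]
--     q = ["q"]
--     r = ["r"]
--     s = ["s"]
--     t = ["t"]
--     u = ["u"]
--     v = ["v"]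
--     w = ["w"]
--     x = ["x"]
--     y = ["y"]
--     z = ["z"]
--
--     for letter in li:
--         if letter[0] == "a":
--             a.append(letter)
--         if letter[0] == "b":
--             b.append(letter)
--         if letter[0] == "c":
--             c.append(letter)
--         if letter[0] == "d":
--             d.append(letter)
--         if letter[0] == "e":
--             e.append(letter)
--         if letter[0] == "f":
--             f.append(letter)
--         if letter[0] == "g":
--             g.append(letter)
--         if letter[0] == "h":
--             h.append(letter)
--         if letter[0] == "i":
--             i.append(letter)
--         if letter[0] == "j":
--             j.append(letter)
--         if letter[0] == "k":
--             k.append(letter)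
--         if letter[0] == "l":
--             l.append(letter)
--         if letter[0] == "m":
--             m.append(letter)
--         if letter[0] == "n":
--             n.append(letter)
--         if letter[0] == "o":
--             o.append(letter)
--         if letter[0] == "p":
--             p.append(letter)
--         if letter[0] == "q":
--             q.append(letter)
--         if letter[0] == "r":
--             r.append(letter)
--         if letter[0] == "s":
--             s.append(letter)
--         if letter[0] == "t":
--             t.append(letter)
--         if letter[0] == "u":
--             u.append(letter)
--         if letter[0] == "v":
--             v.append(letter)
--         if letter[0] == "w":
--             w.append(letter)
--         if letter[0] == "x":
--             x.append(letter)
--         if letter[0] == "y":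
--             y.append(letter)
--         if letter[0] == "z":
--             z.append(letter)
--
--     return [a,b,c,d,e,f,g,h,i,j,k,l,m,n,o,p,q,r,s,t,u,v,w,x,y,z]
-- ===== SOURCE B (Python) =====
-- import string
--
-- def split_first_char(li):
--     # One bucket per lowercase letter: the letter itself, then the items of li
--     # whose first character is that letter (no guard, so '' raises like A does).
--     return [[ch] + [s for s in li if s[0] == ch] for ch in string.ascii_lowercase]
-- ===== Notes on version B (the rewrite author's own statement) =====
-- stated objective: simpler
-- what changed: Replaces A's 26 named accumulator lists updated in a single item pass (26 if-statements per item) by a two-line comprehension over the alphabet: each bucket is the letter followed by a per-letter filter of the input.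
import Mathlib
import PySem

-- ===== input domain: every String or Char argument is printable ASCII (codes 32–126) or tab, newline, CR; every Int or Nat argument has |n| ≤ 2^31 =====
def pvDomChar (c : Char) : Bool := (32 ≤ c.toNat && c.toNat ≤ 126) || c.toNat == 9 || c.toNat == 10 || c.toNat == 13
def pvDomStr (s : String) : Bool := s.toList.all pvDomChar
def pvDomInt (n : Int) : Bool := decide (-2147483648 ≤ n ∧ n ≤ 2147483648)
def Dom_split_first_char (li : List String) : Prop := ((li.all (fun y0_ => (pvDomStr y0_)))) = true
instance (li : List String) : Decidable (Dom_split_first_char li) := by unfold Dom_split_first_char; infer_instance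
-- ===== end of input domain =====

-- B replaces A's single pass over li that appends into 26 named accumulator lists by a
-- comprehension over the alphabet doing one per-letter filter of li (simpler decomposition).

def pvAlphabet : List Char :=
  ['a','b','c','d','e','f','g','h','i','j','k','l','m','n','o','p','q','r','s','t','u','v','w','x','y','z']

-- ===== PORT A =====
-- A keeps 26 separate accumulator lists (one per letter), initialised to [letter], and in a
-- single pass over li appends each item to the bucket whose letter equals item[0]
-- (the 26 independent if-statements per item are the per-bucket updates of this zipWith step).
def split_first_char (li : List String) : List (List String) :=
  li.foldl
    (fun st letter =>
      List.zipWith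
        (fun c bucket => if PySem.Str.pyGet? letter 0 = some c then bucket ++ [letter] else bucket)
        pvAlphabet st)
    (pvAlphabet.map (fun c => [String.ofList [c]]))

-- ===== PORT B =====
def split_first_char_alt (li : List String) : List (List String) :=
  pvAlphabet.map (fun c =>
    [String.ofList [c]] ++ li.filter (fun s => PySem.Str.pyGet? s 0 = some c))

-- ===== PRECONDITION & SPEC =====
-- Pre_ excludes lists containing the empty string, on which A raises IndexError at letter[0].
def Pre_split_first_char (li : List String) : Prop := ∀ s ∈ li, s ≠ ""
instance (li : List String) : Decidable (Pre_split_first_char li) := by unfold Pre_split_first_char; infer_instance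
def pvWitness_split_first_char : List String := (["apple", "bee", "Zoo", "ant"])

def Spec_split_first_char (li : List String) (out : List (List String)) : Prop := out = split_first_char_alt li
instance (li : List String) (out : List (List String)) : Decidable (Spec_split_first_char li out) := by unfold Spec_split_first_char; infer_instance

-- ===== CLAIM (what is proved, stated in full; the proofs are below) =====
def Claim_equal_split_first_char : Prop := ∀ (li : List String), Dom_split_first_char li → Pre_split_first_char li → Spec_split_first_char li (split_first_char li)

-- ===== LEMMAS AND PROOFS =====

-- zipWith with the same left list twice composes pointwise
theorem pv_zipWith_zipWith {α β : Type} (f g : α → β → β) (as : List α) (bs : List β) :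
    List.zipWith f as (List.zipWith g as bs) = List.zipWith (fun a b => f a (g a b)) as bs := by
  induction as generalizing bs with
  | nil => simp
  | cons a as ih =>
    cases bs with
    | nil => simp
    | cons b bs => simp [List.zipWith, ih]

theorem pv_zipWith_id {α β : Type} (as : List α) (bs : List β)
    (h : bs.length = as.length) :
    List.zipWith (fun _ b => b) as bs = bs := by
  induction as generalizing bs with
  | nil => cases bs <;> simp_all
  | cons a as ih =>
    cases bs with
    | nil => simp_all
    | cons b bs => simp_all [List.zipWith]

-- the fold over li of per-item 26-way updates equals the per-letter filters appended to st
theorem pv_fold_eq_filter (li : List String) (st : List (List String))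
    (h : st.length = pvAlphabet.length) :
    li.foldl
      (fun st letter =>
        List.zipWith
          (fun c bucket => if PySem.Str.pyGet? letter 0 = some c then bucket ++ [letter] else bucket)
          pvAlphabet st)
      st
    = List.zipWith
        (fun c bucket => bucket ++ li.filter (fun s => PySem.Str.pyGet? s 0 = some c))
        pvAlphabet st := by
  induction li generalizing st with
  | nil =>
    simp only [List.foldl_nil, List.filter_nil, List.append_nil]
    exact (pv_zipWith_id pvAlphabet st h).symm
  | cons x xs ih =>
    rw [List.foldl_cons, ih _ (by rw [List.length_zipWith, h]; simp),
        pv_zipWith_zipWith]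
    congr 1
    funext c bucket
    by_cases hx : PySem.List.pyGet? x.toList 0 = some c <;>
      simp [hx, List.append_assoc]

theorem pv_zipWith_map_self {α β : Type} (f : α → β → β) (g : α → β) (as : List α) :
    List.zipWith f as (as.map g) = as.map (fun a => f a (g a)) := by
  induction as with
  | nil => simp
  | cons a as ih => simp [List.zipWith, ih]

theorem pv_alt_eq_zipWith (li : List String) :
    split_first_char_alt li
      = List.zipWith
          (fun c bucket => bucket ++ li.filter (fun s => PySem.Str.pyGet? s 0 = some c))
          pvAlphabet (pvAlphabet.map (fun c => [String.ofList [c]])) := by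
  unfold split_first_char_alt
  exact (pv_zipWith_map_self ..).symm

-- ===== VERDICT (by name: the statement is the Claim_ definition above) =====
theorem split_first_char_spec : Claim_equal_split_first_char := by
  intro li _ _
  unfold Spec_split_first_char split_first_char
  rw [pv_fold_eq_filter li _ (by simp), pv_alt_eq_zipWith]
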